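-- pv_equiv track=rewrite | github.com/HeeroYui/monk | monkHtml.py | parse_doxygen
-- ===== SOURCE A (Python) =====
-- def display_doxygen_param(comment, input, output):
-- 	data = "<b>Parameter"
-- 	if input == True:
-- 		data += " [input]"
-- 	if output == True:
-- 		data += " [output]"
-- 	data += ":</b> "
-- 	#extract first element:
-- 	val = comment.find(" ")
-- 	var = comment[:val]
-- 	endComment = comment[val:]
-- 	# TODO : Check if it exist in the parameter list ...
-- 	data += "<span class=\"code-argument\">" + var + "</span> " + endComment
--
-- 	data += "<br/>"
-- 	return data
--
-- def parse_doxygen(data) :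
-- 	streams = data.split("@")
-- 	data2 = ''
-- 	for element in streams:
-- 		if    element[:1] == "\n" \
-- 		   or element[:2] == "\n\n":
-- 			# nothing to do : Nomale case of the first \n
-- 			None
-- 		elif element[:6] == "brief ":
-- 			data2 += element[6:]
-- 			data2 += "<br/>"
--
-- 	for element in streams:
-- 		if    element[:1] == "\n" \
-- 		   or element[:2] == "\n\n":
-- 			# nothing to do : Nomale case of the first \n
-- 			None
-- 		elif element[:5] == "note ":
-- 			data2 += "<b>Notes:</b> "
-- 			data2 += element[5:]
-- 			data2 += "<br/> "
--
-- 	data3 = ''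
-- 	for element in streams:
-- 		if    element[:1] == "\n" \
-- 		   or element[:2] == "\n\n":
-- 			# nothing to do : Nomale case of the first \n
-- 			None
-- 		elif    element[:14] == "param[in,out] " \
-- 		     or element[:14] == "param[out,in] ":
-- 			data3 += display_doxygen_param(element[14:], True, True)
-- 		elif element[:10] == "param[in] ":
-- 			data3 += display_doxygen_param(element[10:], True, False)
-- 		elif element[:11] == "param[out] ":
-- 			data3 += display_doxygen_param(element[11:], False, True)
-- 		elif element[:6] == "param ":
-- 			data3 += display_doxygen_param(element[6:], False, False)
-- 		elif element[:7] == "return ":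
-- 			data3 += "<b>Return:</b> "
-- 			data3 += element[7:]
-- 			data3 += "<br/>"
-- 	if data3 != '':
-- 		data2 += "<ul>\n"
-- 		data2 += data3
-- 		data2 += "</ul>\n"
-- 	return data2
-- ===== SOURCE B (Python) =====
-- def display_doxygen_param(comment, input, output):
-- 	head = ("<b>Parameter"
-- 	        + (" [input]" if input else "")
-- 	        + (" [output]" if output else "")
-- 	        + ":</b> ")
-- 	i = comment.find(" ")
-- 	return (head + '<span class="code-argument">' + comment[:i]
-- 	        + "</span> " + comment[i:] + "<br/>")
--
-- def parse_doxygen(data):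
-- 	brief_buf = ''
-- 	note_buf = ''
-- 	param_buf = ''
-- 	for element in data.split("@"):
-- 		if element.startswith("\n"):
-- 			continue
-- 		if element.startswith("brief "):
-- 			brief_buf += element[6:] + "<br/>"
-- 		elif element.startswith("note "):
-- 			note_buf += "<b>Notes:</b> " + element[5:] + "<br/> "
-- 		elif element.startswith("param[in,out] ") or element.startswith("param[out,in] "):
-- 			param_buf += display_doxygen_param(element[14:], True, True)
-- 		elif element.startswith("param[in] "):
-- 			param_buf += display_doxygen_param(element[10:], True, False)
-- 		elif element.startswith("param[out] "):
-- 			param_buf += display_doxygen_param(element[11:], False, True)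
-- 		elif element.startswith("param "):
-- 			param_buf += display_doxygen_param(element[6:], False, False)
-- 		elif element.startswith("return "):
-- 			param_buf += "<b>Return:</b> " + element[7:] + "<br/>"
-- 	data2 = brief_buf + note_buf
-- 	if param_buf:
-- 		data2 += "<ul>\n" + param_buf + "</ul>\n"
-- 	return data2
-- ===== Notes on version B (the rewrite author's own statement) =====
-- stated objective: alternative
-- what changed: Replaced A's three separate scans over the '@'-split stream (brief, note, then param/return, each re-testing the newline skip) by a single pass that classifies each element once in one if/elif chain and appends to one of three accumulator buffers (brief/note/param), concatenating the buffers at the end.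
import Mathlib
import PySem

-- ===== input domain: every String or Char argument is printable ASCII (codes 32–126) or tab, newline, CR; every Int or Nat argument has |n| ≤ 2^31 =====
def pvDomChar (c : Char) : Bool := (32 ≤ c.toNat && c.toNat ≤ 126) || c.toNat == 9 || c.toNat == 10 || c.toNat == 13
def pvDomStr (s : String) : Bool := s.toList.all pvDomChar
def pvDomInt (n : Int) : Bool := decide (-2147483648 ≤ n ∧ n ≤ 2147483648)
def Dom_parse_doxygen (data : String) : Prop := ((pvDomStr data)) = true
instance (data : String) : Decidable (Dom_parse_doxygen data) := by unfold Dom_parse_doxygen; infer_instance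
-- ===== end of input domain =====

-- B replaces A's three separate scans over the split stream by ONE pass keeping three
-- accumulator buffers (brief/note/param); objective: alternative/simpler decomposition.

-- ===== PORT A =====
-- port of display_doxygen_param (A's version, incremental += building)
def pvDDP (comment : String) (input : Bool) (output : Bool) : String :=
  let data := "<b>Parameter"
  let data := if input = true then data ++ " [input]" else data
  let data := if output = true then data ++ " [output]" else data
  let data := data ++ ":</b> "
  let val := PySem.Str.find comment " "
  let var := PySem.Str.slice comment none (some val)
  let endComment := PySem.Str.slice comment (some val) none
  let data := data ++ "<span class=\"code-argument\">" ++ var ++ "</span> " ++ endComment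
  data ++ "<br/>"

-- the body of A's first loop (brief)
def pvStepA1 (data2 : String) (element : String) : String :=
  if PySem.Str.slice element none (some 1) = "\n" ∨ PySem.Str.slice element none (some 2) = "\n\n" then
    data2
  else if PySem.Str.slice element none (some 6) = "brief " then
    data2 ++ PySem.Str.slice element (some 6) none ++ "<br/>"
  else data2

-- the body of A's second loop (note)
def pvStepA2 (data2 : String) (element : String) : String :=
  if PySem.Str.slice element none (some 1) = "\n" ∨ PySem.Str.slice element none (some 2) = "\n\n" then
    data2
  else if PySem.Str.slice element none (some 5) = "note " then
    data2 ++ "<b>Notes:</b> " ++ PySem.Str.slice element (some 5) none ++ "<br/> "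
  else data2

-- the body of A's third loop (param/return)
def pvStepA3 (data3 : String) (element : String) : String :=
  if PySem.Str.slice element none (some 1) = "\n" ∨ PySem.Str.slice element none (some 2) = "\n\n" then
    data3
  else if PySem.Str.slice element none (some 14) = "param[in,out] " ∨
          PySem.Str.slice element none (some 14) = "param[out,in] " then
    data3 ++ pvDDP (PySem.Str.slice element (some 14) none) true true
  else if PySem.Str.slice element none (some 10) = "param[in] " then
    data3 ++ pvDDP (PySem.Str.slice element (some 10) none) true false
  else if PySem.Str.slice element none (some 11) = "param[out] " then
    data3 ++ pvDDP (PySem.Str.slice element (some 11) none) false true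
  else if PySem.Str.slice element none (some 6) = "param " then
    data3 ++ pvDDP (PySem.Str.slice element (some 6) none) false false
  else if PySem.Str.slice element none (some 7) = "return " then
    data3 ++ "<b>Return:</b> " ++ PySem.Str.slice element (some 7) none ++ "<br/>"
  else data3

def parse_doxygen (data : String) : String :=
  -- data.split("@"); the separator "@" is non-empty so split? is always `some`
  let streams := (PySem.Str.split? data "@").getD []
  let data2 := streams.foldl pvStepA1 ""
  let data2 := streams.foldl pvStepA2 data2
  let data3 := streams.foldl pvStepA3 ""
  if data3 ≠ "" then data2 ++ "<ul>\n" ++ data3 ++ "</ul>\n" else data2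

-- ===== PORT B =====
-- port of display_doxygen_param (B's version, one expression)
def pvDDPalt (comment : String) (input : Bool) (output : Bool) : String :=
  let head := "<b>Parameter" ++ (if input then " [input]" else "")
              ++ (if output then " [output]" else "") ++ ":</b> "
  let i := PySem.Str.find comment " "
  head ++ "<span class=\"code-argument\">" ++ PySem.Str.slice comment none (some i)
       ++ "</span> " ++ PySem.Str.slice comment (some i) none ++ "<br/>"

-- B's single-pass loop body over the triple (brief_buf, note_buf, param_buf)
def pvStepB (acc : String × String × String) (element : String) : String × String × String :=
  let bb := acc.1
  let nb := acc.2.1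
  let pb := acc.2.2
  if PySem.Str.startswith element "\n" then acc
  else if PySem.Str.startswith element "brief " then
    (bb ++ PySem.Str.slice element (some 6) none ++ "<br/>", nb, pb)
  else if PySem.Str.startswith element "note " then
    (bb, nb ++ "<b>Notes:</b> " ++ PySem.Str.slice element (some 5) none ++ "<br/> ", pb)
  else if PySem.Str.startswith element "param[in,out] " || PySem.Str.startswith element "param[out,in] " then
    (bb, nb, pb ++ pvDDPalt (PySem.Str.slice element (some 14) none) true true)
  else if PySem.Str.startswith element "param[in] " then
    (bb, nb, pb ++ pvDDPalt (PySem.Str.slice element (some 10) none) true false)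
  else if PySem.Str.startswith element "param[out] " then
    (bb, nb, pb ++ pvDDPalt (PySem.Str.slice element (some 11) none) false true)
  else if PySem.Str.startswith element "param " then
    (bb, nb, pb ++ pvDDPalt (PySem.Str.slice element (some 6) none) false false)
  else if PySem.Str.startswith element "return " then
    (bb, nb, pb ++ "<b>Return:</b> " ++ PySem.Str.slice element (some 7) none ++ "<br/>")
  else acc

def parse_doxygen_alt (data : String) : String :=
  -- data.split("@"); the separator "@" is non-empty so split? is always `some`
  let acc := ((PySem.Str.split? data "@").getD []).foldl pvStepB ("", "", "")
  let data2 := acc.1 ++ acc.2.1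
  if acc.2.2 ≠ "" then data2 ++ ("<ul>\n" ++ acc.2.2 ++ "</ul>\n") else data2

-- ===== PRECONDITION & SPEC =====
def Spec_parse_doxygen (data : String) (out : String) : Prop := out = parse_doxygen_alt data
instance (data : String) (out : String) : Decidable (Spec_parse_doxygen data out) := by unfold Spec_parse_doxygen; infer_instance

-- ===== CLAIM (what is proved, stated in full; the proofs are below) =====
def Claim_equal_parse_doxygen : Prop := ∀ (data : String), Dom_parse_doxygen data → Spec_parse_doxygen data (parse_doxygen data)

-- ===== LEMMAS AND PROOFS =====

-- s.startswith(p) tested as a list-prefix proposition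
theorem pv_sw_iff (e lit : String) :
    PySem.Str.startswith e lit = true ↔ lit.toList <+: e.toList := by
  rw [PySem.Str.startswith_eq, PySem.Chars.startswith, List.isPrefixOf_iff_prefix]

-- s[:k] == lit (lit of length k) tested as a list-prefix proposition
theorem pv_slice_lit_iff (e lit : String) (k : Int) (hk : 0 ≤ k)
    (hlen : lit.toList.length = k.toNat) :
    PySem.Str.slice e none (some k) = lit ↔ lit.toList <+: e.toList := by
  rw [← String.toList_inj, PySem.Str.toList_slice, PySem.Chars.slice_eq_listSlice,
      PySem.List.slice_to _ hk]
  constructor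
  · intro h; rw [← h]; exact List.take_prefix _ _
  · intro h2
    rw [List.prefix_iff_eq_take] at h2
    rw [hlen] at h2
    exact h2.symm

-- two nonempty prefixes of the same list start with the same character
theorem pv_prefix_head_eq {cs l1 l2 : List Char} (h1 : l1 <+: cs) (h2 : l2 <+: cs)
    (n1 : l1 ≠ []) : l1.head? = l2.head? ∨ l2 = [] := by
  rcases l2 with _ | ⟨b, l2⟩
  · exact Or.inr rfl
  rcases l1 with _ | ⟨a, l1⟩
  · exact absurd rfl n1
  left
  obtain ⟨t1, rfl⟩ := h1
  obtain ⟨t2, he⟩ := h2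
  simp only [List.cons_append] at he
  injection he with h _
  simp [h]

-- distinct first characters exclude simultaneous prefixes
theorem pv_prefix_excl {cs l1 l2 : List Char} (h1 : l1 <+: cs) (ha : l1.head? = some 'b' ∨ l1.head? = some 'n')
    (hb : l2.head? = some 'p' ∨ l2.head? = some 'r') : ¬ (l2 <+: cs) := by
  intro h2
  have hne : l1 ≠ [] := by rintro rfl; simp at ha
  rcases pv_prefix_head_eq h1 h2 hne with h | h
  · rcases ha with ha | ha <;> rcases hb with hb | hb <;> rw [ha, hb] at h <;> simp at h
  · rw [h] at hb; simp at hb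

-- the two display_doxygen_param variants agree
theorem pv_ddp_eq (c : String) (i o : Bool) : pvDDPalt c i o = pvDDP c i o := by
  cases i <;> cases o <;>
    simp [pvDDP, pvDDPalt, String.append_empty, String.append_assoc]

-- B's single step is the product of A's three steps
theorem pv_stepB_eq (acc : String × String × String) (e : String) :
    pvStepB acc e = (pvStepA1 acc.1 e, pvStepA2 acc.2.1 e, pvStepA3 acc.2.2 e) := by
  obtain ⟨b, n, p⟩ := acc
  simp only [pvStepB, pvStepA1, pvStepA2, pvStepA3, pv_ddp_eq, Bool.or_eq_true,
    pv_sw_iff,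
    pv_slice_lit_iff e "\n" 1 (by norm_num) (by decide),
    pv_slice_lit_iff e "\n\n" 2 (by norm_num) (by decide),
    pv_slice_lit_iff e "brief " 6 (by norm_num) (by decide),
    pv_slice_lit_iff e "note " 5 (by norm_num) (by decide),
    pv_slice_lit_iff e "param[in,out] " 14 (by norm_num) (by decide),
    pv_slice_lit_iff e "param[out,in] " 14 (by norm_num) (by decide),
    pv_slice_lit_iff e "param[in] " 10 (by norm_num) (by decide),
    pv_slice_lit_iff e "param[out] " 11 (by norm_num) (by decide),
    pv_slice_lit_iff e "param " 6 (by norm_num) (by decide),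
    pv_slice_lit_iff e "return " 7 (by norm_num) (by decide)]
  have tl0 : ("\n" : String).toList = ['\n'] := rfl
  have tl1 : ("\n\n" : String).toList = ['\n', '\n'] := rfl
  have tl2 : ("brief " : String).toList = ['b', 'r', 'i', 'e', 'f', ' '] := rfl
  have tl3 : ("note " : String).toList = ['n', 'o', 't', 'e', ' '] := rfl
  have tl4 : ("param[in,out] " : String).toList = ['p', 'a', 'r', 'a', 'm', '[', 'i', 'n', ',', 'o', 'u', 't', ']', ' '] := rfl
  have tl5 : ("param[out,in] " : String).toList = ['p', 'a', 'r', 'a', 'm', '[', 'o', 'u', 't', ',', 'i', 'n', ']', ' '] := rfl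
  have tl6 : ("param[in] " : String).toList = ['p', 'a', 'r', 'a', 'm', '[', 'i', 'n', ']', ' '] := rfl
  have tl7 : ("param[out] " : String).toList = ['p', 'a', 'r', 'a', 'm', '[', 'o', 'u', 't', ']', ' '] := rfl
  have tl8 : ("param " : String).toList = ['p', 'a', 'r', 'a', 'm', ' '] := rfl
  have tl9 : ("return " : String).toList = ['r', 'e', 't', 'u', 'r', 'n', ' '] := rfl
  simp only [tl0, tl1, tl2, tl3, tl4, tl5, tl6, tl7, tl8, tl9]
  by_cases hn : ['\n'] <+: e.toList
  · simp [hn]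
  · have hd : ¬(['\n'] <+: e.toList ∨ ['\n', '\n'] <+: e.toList) := by
      rintro (h | h)
      · exact hn h
      · exact hn (List.IsPrefix.trans (by decide : ['\n'] <+: ['\n', '\n']) h)
    simp only [if_neg hn, if_neg hd]
    by_cases hb : ['b', 'r', 'i', 'e', 'f', ' '] <+: e.toList
    · have e1 : ¬ (['n', 'o', 't', 'e', ' '] <+: e.toList) := by
        intro h
        rcases pv_prefix_head_eq hb h (by decide) with hh | hh <;> simp at hh
      have e2 := pv_prefix_excl hb (Or.inl (by decide)) (Or.inl (by decide)) (l2 := ['p', 'a', 'r', 'a', 'm', '[', 'i', 'n', ',', 'o', 'u', 't', ']', ' '])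
      have e3 := pv_prefix_excl hb (Or.inl (by decide)) (Or.inl (by decide)) (l2 := ['p', 'a', 'r', 'a', 'm', '[', 'o', 'u', 't', ',', 'i', 'n', ']', ' '])
      have e4 := pv_prefix_excl hb (Or.inl (by decide)) (Or.inl (by decide)) (l2 := ['p', 'a', 'r', 'a', 'm', '[', 'i', 'n', ']', ' '])
      have e5 := pv_prefix_excl hb (Or.inl (by decide)) (Or.inl (by decide)) (l2 := ['p', 'a', 'r', 'a', 'm', '[', 'o', 'u', 't', ']', ' '])
      have e6 := pv_prefix_excl hb (Or.inl (by decide)) (Or.inl (by decide)) (l2 := ['p', 'a', 'r', 'a', 'm', ' '])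
      have e7 := pv_prefix_excl hb (Or.inl (by decide)) (Or.inr (by decide)) (l2 := ['r', 'e', 't', 'u', 'r', 'n', ' '])
      simp [hb, e1, e2, e3, e4, e5, e6, e7]
    · simp only [if_neg hb]
      by_cases hnote : ['n', 'o', 't', 'e', ' '] <+: e.toList
      · have e2 := pv_prefix_excl hnote (Or.inr (by decide)) (Or.inl (by decide)) (l2 := ['p', 'a', 'r', 'a', 'm', '[', 'i', 'n', ',', 'o', 'u', 't', ']', ' '])
        have e3 := pv_prefix_excl hnote (Or.inr (by decide)) (Or.inl (by decide)) (l2 := ['p', 'a', 'r', 'a', 'm', '[', 'o', 'u', 't', ',', 'i', 'n', ']', ' '])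
        have e4 := pv_prefix_excl hnote (Or.inr (by decide)) (Or.inl (by decide)) (l2 := ['p', 'a', 'r', 'a', 'm', '[', 'i', 'n', ']', ' '])
        have e5 := pv_prefix_excl hnote (Or.inr (by decide)) (Or.inl (by decide)) (l2 := ['p', 'a', 'r', 'a', 'm', '[', 'o', 'u', 't', ']', ' '])
        have e6 := pv_prefix_excl hnote (Or.inr (by decide)) (Or.inl (by decide)) (l2 := ['p', 'a', 'r', 'a', 'm', ' '])
        have e7 := pv_prefix_excl hnote (Or.inr (by decide)) (Or.inr (by decide)) (l2 := ['r', 'e', 't', 'u', 'r', 'n', ' '])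
        simp [hnote, e2, e3, e4, e5, e6, e7]
      · simp only [if_neg hnote]
        split_ifs <;> rfl

-- folding B's product step is the product of folding A's three steps
theorem pv_foldl_prod (l : List String) (b n p : String) :
    l.foldl pvStepB (b, n, p) =
      (l.foldl pvStepA1 b, l.foldl pvStepA2 n, l.foldl pvStepA3 p) := by
  induction l generalizing b n p with
  | nil => rfl
  | cons e l ih => rw [List.foldl_cons, List.foldl_cons, List.foldl_cons, List.foldl_cons,
      pv_stepB_eq, ih]

-- A's second loop only appends, so its start value factors out
theorem pv_stepA2_shift (x y e : String) : pvStepA2 (x ++ y) e = x ++ pvStepA2 y e := by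
  unfold pvStepA2; split_ifs <;> simp [String.append_assoc]

theorem pv_foldl2_start (l : List String) (x : String) :
    l.foldl pvStepA2 x = x ++ l.foldl pvStepA2 "" := by
  induction l generalizing x with
  | nil => simp
  | cons e l ih =>
    rw [List.foldl_cons, List.foldl_cons, ih (pvStepA2 x e), ih (pvStepA2 "" e),
        ← String.append_assoc]
    congr 1
    have h := pv_stepA2_shift x "" e
    simpa using h

-- ===== VERDICT (by name: the statement is the Claim_ definition above) =====
theorem parse_doxygen_spec : Claim_equal_parse_doxygen := by
  intro data _
  unfold Spec_parse_doxygen parse_doxygen parse_doxygen_alt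
  simp only [pv_foldl_prod]
  rw [pv_foldl2_start]
  split_ifs <;> simp [String.append_assoc]
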